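-- pv_equiv track=rewrite | github.com/VEymeric/MarioKart-Analyzer | programs/Changement_De_Place.py | len_J_Min
-- ===== SOURCE A (Python) =====
-- def len_J_Min(list):
--     min = list[0]
--     a = len(min)
--     index = 0
--     for i in range(1, len(list)):
--         other = list[i]
--         b = len(other)
--         if(b<a):
--             min = list[i]
--             a = len(min)
--             index = i
--     return index
-- ===== SOURCE B (Python) =====
-- def len_J_Min(list):
--     # pass 1: minimum length (initialising from list[0] so [] raises IndexError like A)
--     m = len(list[0])
--     for x in list:
--         if len(x) < m:
--             m = len(x)
--     # pass 2: first index achieving the minimum (always found for nonempty input)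
--     for i, x in enumerate(list):
--         if len(x) == m:
--             return i
-- ===== Notes on version B (the rewrite author's own statement) =====
-- stated objective: simpler
-- what changed: Replaces A's single index-range scan that tracks the running minimum element, its length and its index, with two plain passes: one to compute the minimum length, one to return the first index attaining it.
import Mathlib
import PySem

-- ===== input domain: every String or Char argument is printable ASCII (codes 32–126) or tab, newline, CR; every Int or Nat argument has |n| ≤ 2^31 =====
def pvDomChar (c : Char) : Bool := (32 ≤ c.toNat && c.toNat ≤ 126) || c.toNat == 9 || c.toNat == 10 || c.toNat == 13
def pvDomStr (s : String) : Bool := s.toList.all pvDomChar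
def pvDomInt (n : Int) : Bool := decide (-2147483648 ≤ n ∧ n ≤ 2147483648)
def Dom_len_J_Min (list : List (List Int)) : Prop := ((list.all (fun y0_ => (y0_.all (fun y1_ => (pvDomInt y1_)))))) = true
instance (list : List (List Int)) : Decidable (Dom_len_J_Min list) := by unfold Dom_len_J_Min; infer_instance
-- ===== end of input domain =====

-- B replaces A's single tracking scan by two plain passes (min length, then first index attaining it): simpler decomposition, same O(n) cost.


-- ===== PORT A =====
-- literal transliteration: state (min, a, index), loop over range(1, len(list)) with list[i]
def len_J_Min (list : List (List Int)) : Int :=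
  let mn := PySem.List.pyGetD list 0 []
  let a : Int := mn.length
  let index : Int := 0
  let st :=
    (PySem.List.pyRange 1 (list.length : Int) 1).foldl
      (fun (st : List Int × Int × Int) i =>
        let other := PySem.List.pyGetD list i []
        let b : Int := other.length
        if b < st.2.1 then (other, (other.length : Int), i) else st)
      (mn, a, index)
  st.2.2

-- ===== PORT B =====
-- pass 2 of Source B: first index (from the enumerate pairs) whose element has length m
def lenFindIdx (m : Int) : List (Int × List Int) → Int
  | [] => 0      -- unreachable for nonempty input (m is an attained length)
  | (i, x) :: rest => if ((x.length : Int) == m) then i else lenFindIdx m rest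

def len_J_Min_alt (list : List (List Int)) : Int :=
  let m : Int :=
    list.foldl (fun m x => if (x.length : Int) < m then (x.length : Int) else m)
      ((PySem.List.pyGetD list 0 []).length : Int)
  lenFindIdx m (PySem.List.enumerate list 0)

-- ===== PRECONDITION & SPEC =====
-- Python A raises IndexError on the empty list (list[0])
def Pre_len_J_Min (list : List (List Int)) : Prop := list ≠ []
instance (list : List (List Int)) : Decidable (Pre_len_J_Min list) := by unfold Pre_len_J_Min; infer_instance
def pvWitness_len_J_Min : List (List Int) := [[1, 2], [3]]

def Spec_len_J_Min (list : List (List Int)) (out : Int) : Prop := out = len_J_Min_alt list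
instance (list : List (List Int)) (out : Int) : Decidable (Spec_len_J_Min list out) := by unfold Spec_len_J_Min; infer_instance

-- ===== CLAIM (what is proved, stated in full; the proofs are below) =====
def Claim_equal_len_J_Min : Prop := ∀ (list : List (List Int)), Dom_len_J_Min list → Pre_len_J_Min list → Spec_len_J_Min list (len_J_Min list)

-- ===== LEMMAS AND PROOFS =====

-- B's minimum-length fold, abstracted over its initial value
def fmin (m : Int) (ys : List (List Int)) : Int :=
  ys.foldl (fun m x => if (x.length : Int) < m then (x.length : Int) else m) m

lemma fmin_le (ys : List (List Int)) : ∀ m : Int, fmin m ys ≤ m := by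
  induction ys with
  | nil => intro m; simp [fmin]
  | cons y ys ih =>
    intro m
    simp only [fmin, List.foldl_cons]
    split_ifs with h
    · exact le_of_lt (lt_of_le_of_lt (ih _) h)
    · exact ih m

-- A's loop body as a function of an enumerate pair
def Abody (st : List Int × Int × Int) (p : Int × List Int) : List Int × Int × Int :=
  if ((p.2.length : Int)) < st.2.1 then (p.2, (p.2.length : Int), p.1) else st

-- key invariant: A's tracking fold over the tail = "did the min drop? then first index of it, else old index"
lemma key (ys : List (List Int)) : ∀ (s : Int) (mn : List Int) (idx : Int),
    (List.foldl Abody (mn, (mn.length : Int), idx) (PySem.List.enumerate ys s)).2.2 =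
      if fmin (mn.length : Int) ys < (mn.length : Int) then
        lenFindIdx (fmin (mn.length : Int) ys) (PySem.List.enumerate ys s)
      else idx := by
  induction ys with
  | nil => intro s mn idx; simp [fmin, PySem.List.enumerate_nil]
  | cons y ys ih =>
    intro s mn idx
    rw [PySem.List.enumerate_cons]
    by_cases h : ((y.length : Int)) < (mn.length : Int)
    · have hA : Abody (mn, (mn.length : Int), idx) (s, y) = (y, (y.length : Int), s) := by
        simp [Abody, h]
      have hf : fmin (mn.length : Int) (y :: ys) = fmin (y.length : Int) ys := by
        simp [fmin, h]
      rw [List.foldl_cons, hA, ih (s + 1) y s, hf]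
      have hle : fmin (y.length : Int) ys ≤ (y.length : Int) := fmin_le ys _
      by_cases h2 : fmin (y.length : Int) ys < (y.length : Int)
      · rw [if_pos h2, if_pos (lt_trans h2 h)]
        have : ¬ ((y.length : Int) == fmin (y.length : Int) ys) = true := by
          simp; omega
        simp [lenFindIdx, this]
      · have heq : fmin (y.length : Int) ys = (y.length : Int) := le_antisymm hle (not_lt.mp h2)
        rw [if_neg h2, if_pos (by omega : fmin (y.length : Int) ys < (mn.length : Int))]
        simp [lenFindIdx, heq]
    · have hA : Abody (mn, (mn.length : Int), idx) (s, y) = (mn, (mn.length : Int), idx) := by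
        simp [Abody, h]
      have hf : fmin (mn.length : Int) (y :: ys) = fmin (mn.length : Int) ys := by
        simp [fmin, h]
      rw [List.foldl_cons, hA, ih (s + 1) mn idx, hf]
      by_cases h2 : fmin (mn.length : Int) ys < (mn.length : Int)
      · rw [if_pos h2, if_pos h2]
        have : ¬ ((y.length : Int) == fmin (mn.length : Int) ys) = true := by
          simp; omega
        simp [lenFindIdx, this]
      · rw [if_neg h2, if_neg h2]

-- A's pyRange/pyGetD fold over (x :: xs) is the Abody fold over enumerate xs 1
lemma rangeFold_eq_enumerate (x : List Int) (xs : List (List Int)) (init : List Int × Int × Int) :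
    (PySem.List.pyRange 1 ((x :: xs).length : Int) 1).foldl
        (fun (st : List Int × Int × Int) i =>
          let other := PySem.List.pyGetD (x :: xs) i []
          let b : Int := other.length
          if b < st.2.1 then (other, (other.length : Int), i) else st)
        init
      = List.foldl Abody init (PySem.List.enumerate xs 1) := by
  have hmap : PySem.List.enumerate xs 1 =
      (PySem.List.pyRange 1 ((x :: xs).length : Int) 1).map
        (fun j => (j, PySem.List.pyGetD (x :: xs) j [])) := by
    have h0 : PySem.List.enumerate (x :: xs) 0 =
        (PySem.List.pyRange 0 (((x :: xs).length : Int)) 1).map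
          (fun j => (j, PySem.List.pyGetD (x :: xs) j [])) :=
      PySem.List.enumerate_eq_map_pyRange (x :: xs) []
    have hcons : PySem.List.pyRange 0 (((x :: xs).length : Int)) 1 =
        0 :: PySem.List.pyRange 1 (((x :: xs).length : Int)) 1 := by
      apply PySem.List.pyRange_one_cons
      simp
    rw [hcons, List.map_cons, PySem.List.enumerate_cons] at h0
    exact (List.cons_eq_cons.mp h0).2
  rw [hmap, List.foldl_map]
  rfl

-- ===== VERDICT (by name: the statement is the Claim_ definition above) =====
theorem len_J_Min_spec : Claim_equal_len_J_Min := by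
  intro list _ hpre
  obtain ⟨x, xs, rfl⟩ : ∃ y ys, list = y :: ys := by
    cases list with
    | nil => exact absurd rfl hpre
    | cons y ys => exact ⟨y, ys, rfl⟩
  unfold Spec_len_J_Min len_J_Min len_J_Min_alt
  simp only []
  rw [rangeFold_eq_enumerate]
  have hget : PySem.List.pyGetD (x :: xs) 0 [] = x := by
    simp [PySem.List.pyGetD, PySem.List.pyGet?, PySem.List.pyIdx?]
  rw [hget]
  have hm : (x :: xs).foldl (fun m y => if (y.length : Int) < m then (y.length : Int) else m)
      ((x.length : Int)) = fmin (x.length : Int) xs := by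
    simp [fmin, List.foldl_cons]
  rw [hm, key xs 1 x 0]
  rw [PySem.List.enumerate_cons]
  have hle : fmin (x.length : Int) xs ≤ (x.length : Int) := fmin_le xs _
  by_cases h2 : fmin (x.length : Int) xs < (x.length : Int)
  · rw [if_pos h2]
    have : ¬ ((x.length : Int) == fmin (x.length : Int) xs) = true := by simp; omega
    simp [lenFindIdx, this]
  · have heq : fmin (x.length : Int) xs = (x.length : Int) := le_antisymm hle (not_lt.mp h2)
    rw [if_neg h2]
    simp [lenFindIdx, heq]
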